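-- pv_equiv track=rewrite | github.com/jojo4626/trail-mate | tools/extract_pinyin_chars.py | iter_candidate_lines
-- ===== SOURCE A (Python) =====
-- def iter_candidate_lines(source_text: str):
--     in_dict = False
--     for raw_line in source_text.splitlines():
--         line = raw_line.rstrip("\r")
--         if not in_dict:
--             marker = 'R"PINYIN_DICT('
--             if marker not in line:
--                 continue
--             line = line.split(marker, 1)[1]
--             in_dict = True
--
--         if ')PINYIN_DICT"' in line:
--             line = line.split(')PINYIN_DICT"', 1)[0]
--             if line:
--                 yield line
--             break
--
--         yield line
-- ===== SOURCE B (Python) =====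
-- def iter_candidate_lines(source_text: str):
--     start = 'R"PINYIN_DICT('
--     end = ')PINYIN_DICT"'
--     i = source_text.find(start)
--     if i == -1:
--         return
--     body = source_text[i + len(start):]
--     j = body.find(end)
--     if j != -1:
--         body = body[:j]
--     yield from body.splitlines()
-- ===== Notes on version B (the rewrite author's own statement) =====
-- stated objective: idiomatic
-- what changed: Replaces the per-line state machine (in_dict flag, per-line marker tests, continue/break) by locating the delimited block once with str.find, slicing the body out by boundary indices, and splitting it into lines.
-- intended difference: When the text's first 'R"PINYIN_DICT(' occurrence sits at the very end of the text (empty block body with no trailing newline or closing marker), A yields one empty string while B yields nothing; an empty unterminated block contains no candidate lines, so B's empty output is the intended value. — e.g. on iter_candidate_lines("R\"PINYIN_DICT("): A returns [""], B returns []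
import Mathlib
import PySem

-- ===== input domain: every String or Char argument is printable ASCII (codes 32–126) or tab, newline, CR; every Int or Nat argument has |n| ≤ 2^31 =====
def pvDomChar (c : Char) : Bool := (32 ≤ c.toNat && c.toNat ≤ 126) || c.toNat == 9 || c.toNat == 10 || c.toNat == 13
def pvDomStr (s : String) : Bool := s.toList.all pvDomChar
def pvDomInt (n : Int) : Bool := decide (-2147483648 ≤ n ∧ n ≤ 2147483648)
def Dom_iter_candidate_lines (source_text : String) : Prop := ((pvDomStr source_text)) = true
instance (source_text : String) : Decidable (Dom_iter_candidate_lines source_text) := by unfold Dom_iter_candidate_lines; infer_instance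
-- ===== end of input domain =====

-- B replaces A's per-line state machine by locating the block once with find and slicing;
-- the proved claims are about the RETURN value (both functions are generators, compared as lists).

-- ===== PORT A =====

-- hand port of str.rstrip("\r"): exact — removes exactly the trailing '\r' characters
def pvRstripCR (s : String) : String :=
  String.ofList ((s.toList.reverse.dropWhile (fun c => c == '\r')).reverse)

def pvIterLoop : List String → Bool → List String
  | [], _ => []
  | raw :: rest, inDict =>
    let line := pvRstripCR raw
    if !inDict && !(PySem.Str.isIn "R\"PINYIN_DICT(" line) then
      pvIterLoop rest inDict
    else
      let line2 := if inDict then line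
        else (PySem.List.pyGet? ((PySem.Str.splitMax? line "R\"PINYIN_DICT(" 1).getD []) 1).getD ""
      if PySem.Str.isIn ")PINYIN_DICT\"" line2 then
        let line3 := (PySem.List.pyGet? ((PySem.Str.splitMax? line2 ")PINYIN_DICT\"" 1).getD []) 0).getD ""
        if line3 ≠ "" then [line3] else []
      else
        line2 :: pvIterLoop rest true

def iter_candidate_lines (source_text : String) : List String :=
  pvIterLoop (PySem.Str.splitlines source_text) false

-- ===== PORT B =====

def iter_candidate_lines_alt (source_text : String) : List String :=
  let i := PySem.Str.find source_text "R\"PINYIN_DICT("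
  if i == -1 then []
  else
    let body := PySem.Str.slice source_text (some (i + 14)) none
    let j := PySem.Str.find body ")PINYIN_DICT\""
    let body2 := if j != -1 then PySem.Str.slice body none (some j) else body
    PySem.Str.splitlines body2

-- ===== PRECONDITION & SPEC =====

-- On texts whose first 'R"PINYIN_DICT(' occurrence is the very end of the text (empty
-- unterminated block body), A yields one empty string while B yields nothing; an empty
-- unterminated block contains no candidate lines, so B's empty output is the intended value.
def D_iter_candidate_lines (source_text : String) : Prop :=
  14 ≤ source_text.toList.length ∧
    PySem.Str.find source_text "R\"PINYIN_DICT(" = (source_text.toList.length : Int) - 14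

instance (source_text : String) : Decidable (D_iter_candidate_lines source_text) := by
  unfold D_iter_candidate_lines; infer_instance

def Spec_iter_candidate_lines (source_text : String) (out : List String) : Prop :=
  ¬ D_iter_candidate_lines source_text → out = iter_candidate_lines_alt source_text

instance (source_text : String) (out : List String) : Decidable (Spec_iter_candidate_lines source_text out) := by
  unfold Spec_iter_candidate_lines; infer_instance

def pvDiffWitness_iter_candidate_lines : String := "R\"PINYIN_DICT("

def pvDiffWitnessOut_iter_candidate_lines : (List String) × (List String) := ([""], [])

-- ===== CLAIM (what is proved, stated in full; the proofs are below) =====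

def Claim_unchanged_iter_candidate_lines : Prop :=
  ∀ (source_text : String), Dom_iter_candidate_lines source_text →
    Spec_iter_candidate_lines source_text (iter_candidate_lines source_text)

def Claim_changed_iter_candidate_lines : Prop :=
  Dom_iter_candidate_lines (pvDiffWitness_iter_candidate_lines) ∧
  D_iter_candidate_lines (pvDiffWitness_iter_candidate_lines) ∧
  iter_candidate_lines (pvDiffWitness_iter_candidate_lines) = pvDiffWitnessOut_iter_candidate_lines.1 ∧
  iter_candidate_lines_alt (pvDiffWitness_iter_candidate_lines) = pvDiffWitnessOut_iter_candidate_lines.2 ∧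
  pvDiffWitnessOut_iter_candidate_lines.1 ≠ pvDiffWitnessOut_iter_candidate_lines.2

def Claim_exact_iter_candidate_lines : Prop :=
  ∀ (source_text : String), Dom_iter_candidate_lines source_text →
    D_iter_candidate_lines source_text →
    iter_candidate_lines source_text ≠ iter_candidate_lines_alt source_text

-- ===== LEMMAS AND PROOFS =====

def pvOPEN : List Char := "R\"PINYIN_DICT(".toList
def pvCLOSE : List Char := ")PINYIN_DICT\"".toList

-- non-break character (Python line semantics restricted to '\n'/'\r')
def pvNB (c : Char) : Bool := !(c == '\n' || c == '\r')

-- the break predicate that PySem.Chars.splitlines uses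
def pvIsB (c : Char) : Bool :=
  decide (c.toNat = 10) || decide (c.toNat = 13) || decide (c.toNat = 11) || decide (c.toNat = 12) ||
  decide (c.toNat = 28) || decide (c.toNat = 29) || decide (c.toNat = 30) || decide (c.toNat = 133) ||
  decide (c.toNat = 8232) || decide (c.toNat = 8233)

-- first split: pvSplit1 sep s = some (before, after) at the FIRST occurrence of sep (sep ≠ [])
def pvSplit1 (sep : List Char) : List Char → Option (List Char × List Char)
  | [] => none
  | c :: t =>
    if sep.isPrefixOf (c :: t) then some ([], (c :: t).drop sep.length)
    else (pvSplit1 sep t).map (fun ab => (c :: ab.1, ab.2))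

-- chars-level model of A's phase 2 (inside the block)
def pvPhase2 : List (List Char) → List (List Char)
  | [] => []
  | line :: rest =>
    match pvSplit1 pvCLOSE line with
    | some ab => if ab.1 ≠ [] then [ab.1] else []
    | none => line :: pvPhase2 rest

-- chars-level model of A's phase 1 (searching for the opening marker)
def pvA1 : List (List Char) → List (List Char)
  | [] => []
  | line :: rest =>
    match pvSplit1 pvOPEN line with
    | none => pvA1 rest
    | some ab => pvPhase2 (ab.2 :: rest)

-- chars-level model of B
def pvB2 (body : List Char) : List (List Char) :=
  match pvSplit1 pvCLOSE body with
  | some ab => PySem.Chars.splitlines ab.1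
  | none => PySem.Chars.splitlines body

def pvBchars (s : List Char) : List (List Char) :=
  match pvSplit1 pvOPEN s with
  | none => []
  | some ab => pvB2 ab.2

theorem pv_splitlines_def (s : List Char) :
    PySem.Chars.splitlines s = PySem.Chars.splitlines.go pvIsB s [] [] := rfl

theorem pv_char_toNat_inj {c d : Char} (h : c.toNat = d.toNat) : c = d := by
  have h1 := Char.ofNat_toNat c
  have h2 := Char.ofNat_toNat d
  rw [h] at h1
  rw [← h1, h2]

theorem pv_isB_dom {c : Char} (hd : pvDomChar c = true) (hn : pvNB c = true) : pvIsB c = false := by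
  simp only [pvDomChar, Bool.or_eq_true, Bool.and_eq_true, decide_eq_true_eq, beq_iff_eq] at hd
  simp only [pvNB, Bool.not_eq_true', Bool.or_eq_false_iff, beq_eq_false_iff_ne, ne_eq] at hn
  have h10 : c.toNat ≠ 10 := fun h => hn.1 (pv_char_toNat_inj h)
  have h13 : c.toNat ≠ 13 := fun h => hn.2 (pv_char_toNat_inj h)
  simp only [pvIsB, Bool.or_eq_false_iff, decide_eq_false_iff_not]
  omega

theorem pv_nb_false {c : Char} : pvNB c = false ↔ (c = '\n' ∨ c = '\r') := by
  simp [pvNB]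
  tauto


-- ---------- splitlines.go lemmas ----------

theorem pv_go_nil (cur : List Char) (acc : List (List Char)) :
    PySem.Chars.splitlines.go pvIsB [] cur acc =
      if cur.isEmpty then acc.reverse else (cur.reverse :: acc).reverse := by
  rw [PySem.Chars.splitlines.go.eq_def]

theorem pv_go_crlf (t cur : List Char) (acc : List (List Char)) :
    PySem.Chars.splitlines.go pvIsB ('\r' :: '\n' :: t) cur acc =
      PySem.Chars.splitlines.go pvIsB t [] (cur.reverse :: acc) := by
  rw [PySem.Chars.splitlines.go.eq_def]
  split
  · rename_i heq; exact absurd heq (by simp)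
  · rename_i rest heq
    injection heq with e1 e2
    injection e2 with e3 e4
    rw [e4]
  · rename_i c' rest hno heq
    exfalso
    injection heq with e1 e2
    exact hno t e1.symm e2.symm

theorem pv_go_flush (c : Char) (t cur : List Char) (acc : List (List Char))
    (hB : pvIsB c = true) (hne : ∀ u, c = '\r' → t = '\n' :: u → False) :
    PySem.Chars.splitlines.go pvIsB (c :: t) cur acc =
      PySem.Chars.splitlines.go pvIsB t [] (cur.reverse :: acc) := by
  rw [PySem.Chars.splitlines.go.eq_def]
  split
  · rename_i heq; exact absurd heq (by simp)
  · rename_i rest heq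
    exfalso
    injection heq with e1 e2
    exact hne rest e1 e2
  · rename_i c' rest hno heq
    injection heq with e1 e2
    subst e1; subst e2
    simp [hB]

theorem pv_go_nonbreak (c : Char) (t cur : List Char) (acc : List (List Char))
    (hB : pvIsB c = false) :
    PySem.Chars.splitlines.go pvIsB (c :: t) cur acc =
      PySem.Chars.splitlines.go pvIsB t (c :: cur) acc := by
  have hcr : c ≠ '\r' := by rintro rfl; exact absurd hB (by decide)
  rw [PySem.Chars.splitlines.go.eq_def]
  split
  · rename_i heq; exact absurd heq (by simp)
  · rename_i rest heq
    exfalso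
    injection heq with e1 e2
    exact hcr e1
  · rename_i c' rest hno heq
    injection heq with e1 e2
    subst e1; subst e2
    simp [hB]

theorem pv_go_nb_prefix (p u cur : List Char) (acc : List (List Char))
    (hp : ∀ c ∈ p, pvIsB c = false) :
    PySem.Chars.splitlines.go pvIsB (p ++ u) cur acc =
      PySem.Chars.splitlines.go pvIsB u (p.reverse ++ cur) acc := by
  induction p generalizing cur with
  | nil => simp
  | cons d p' ih =>
    rw [List.cons_append, pv_go_nonbreak _ _ _ _ (hp d (by simp)),
        ih _ (fun c hc => hp c (List.mem_cons_of_mem _ hc))]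
    simp

theorem pv_go_acc :
    ∀ (t cur : List Char) (acc : List (List Char)),
      PySem.Chars.splitlines.go pvIsB t cur acc =
        acc.reverse ++ PySem.Chars.splitlines.go pvIsB t cur [] := by
  suffices H : ∀ (t cur : List Char) (acc : List (List Char)), ∀ (a : List (List Char)),
      PySem.Chars.splitlines.go pvIsB t cur a =
        a.reverse ++ PySem.Chars.splitlines.go pvIsB t cur [] by
    exact fun t cur acc => H t cur [] acc
  intro t cur acc
  induction t, cur, acc using PySem.Chars.splitlines.go.induct (isB := pvIsB) with
  | case1 cur acc hcur => intro a; simp [pv_go_nil, hcur]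
  | case2 cur acc hcur =>
    intro a; simp only [Bool.not_eq_true] at hcur; simp [pv_go_nil, hcur]
  | case3 rest cur acc ih =>
    intro a
    rw [pv_go_crlf, pv_go_crlf, ih, ih (a := [cur.reverse])]
    simp
  | case4 c rest cur acc hne hB ih =>
    intro a
    rw [pv_go_flush _ _ _ _ hB (fun u h1 h2 => hne u h1 h2),
        pv_go_flush _ _ _ _ hB (fun u h1 h2 => hne u h1 h2), ih, ih (a := [cur.reverse])]
    simp
  | case5 c rest cur acc hne hB ih =>
    intro a
    simp only [Bool.not_eq_true] at hB
    rw [pv_go_nonbreak _ _ _ _ hB, pv_go_nonbreak _ _ _ _ hB, ih]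

-- ---------- splitlines lemmas ----------

theorem pv_splitlines_nil : PySem.Chars.splitlines [] = [] := rfl

theorem pv_splitlines_nb (s : List Char) (hp : ∀ c ∈ s, pvIsB c = false) (hs : s ≠ []) :
    PySem.Chars.splitlines s = [s] := by
  rw [pv_splitlines_def]
  have := pv_go_nb_prefix s [] [] [] hp
  simp only [List.append_nil] at this
  rw [this, pv_go_nil]
  simp [hs]

theorem pv_splitlines_nl (p t : List Char) (hp : ∀ c ∈ p, pvIsB c = false) :
    PySem.Chars.splitlines (p ++ '\n' :: t) = p :: PySem.Chars.splitlines t := by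
  rw [pv_splitlines_def, pv_go_nb_prefix _ _ _ _ hp,
      pv_go_flush _ _ _ _ (by decide) (by intro u h; cases h), pv_go_acc]
  simp [pv_splitlines_def]

theorem pv_splitlines_crlf (p t : List Char) (hp : ∀ c ∈ p, pvIsB c = false) :
    PySem.Chars.splitlines (p ++ '\r' :: '\n' :: t) = p :: PySem.Chars.splitlines t := by
  rw [pv_splitlines_def, pv_go_nb_prefix _ _ _ _ hp, pv_go_crlf, pv_go_acc]
  simp [pv_splitlines_def]

theorem pv_splitlines_cr (p t : List Char) (hp : ∀ c ∈ p, pvIsB c = false)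
    (ht : ∀ u, t ≠ '\n' :: u) :
    PySem.Chars.splitlines (p ++ '\r' :: t) = p :: PySem.Chars.splitlines t := by
  rw [pv_splitlines_def, pv_go_nb_prefix _ _ _ _ hp,
      pv_go_flush _ _ _ _ (by decide) (by intro u _ h2; exact ht u h2), pv_go_acc]
  simp [pv_splitlines_def]

theorem pv_lines_nb (s : List Char) :
    ∀ l ∈ PySem.Chars.splitlines s, ∀ c ∈ l, pvIsB c = false := by
  rw [pv_splitlines_def]
  suffices H : ∀ (t cur : List Char) (acc : List (List Char)),
      (∀ c ∈ cur, pvIsB c = false) → (∀ l ∈ acc, ∀ c ∈ l, pvIsB c = false) →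
      ∀ l ∈ PySem.Chars.splitlines.go pvIsB t cur acc, ∀ c ∈ l, pvIsB c = false by
    exact H s [] [] (by simp) (by simp)
  intro t cur acc
  induction t, cur, acc using PySem.Chars.splitlines.go.induct (isB := pvIsB) with
  | case1 cur acc hcur =>
    intro hc ha l hl
    rw [pv_go_nil] at hl
    simp [hcur] at hl
    exact ha l hl
  | case2 cur acc hcur =>
    intro hc ha l hl
    rw [pv_go_nil] at hl
    simp only [Bool.not_eq_true] at hcur
    rw [if_neg (by simp [hcur])] at hl
    simp only [List.mem_reverse, List.mem_cons] at hl
    rcases hl with rfl | hl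
    · intro c hcl; exact hc c (List.mem_reverse.mp hcl)
    · exact ha l hl
  | case3 rest cur acc ih =>
    intro hc ha l hl
    rw [pv_go_crlf] at hl
    refine ih (by simp) ?_ l hl
    intro l' hl'
    rcases List.mem_cons.mp hl' with rfl | h
    · intro c hcl; exact hc c (List.mem_reverse.mp hcl)
    · exact ha l' h
  | case4 c rest cur acc hne hB ih =>
    intro hc ha l hl
    rw [pv_go_flush _ _ _ _ hB (fun u h1 h2 => hne u h1 h2)] at hl
    refine ih (by simp) ?_ l hl
    intro l' hl'
    rcases List.mem_cons.mp hl' with rfl | h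
    · intro c' hcl; exact hc c' (List.mem_reverse.mp hcl)
    · exact ha l' h
  | case5 c rest cur acc hne hB ih =>
    intro hc ha l hl
    simp only [Bool.not_eq_true] at hB
    rw [pv_go_nonbreak _ _ _ _ hB] at hl
    refine ih ?_ ha l hl
    intro c' hc'
    rcases List.mem_cons.mp hc' with rfl | h
    · exact hB
    · exact hc c' h


-- ---------- pvSplit1 / find / split lemmas ----------

theorem pv_find_go_eq (sep : List Char) (hsep : sep ≠ []) :
    ∀ (s : List Char) (k : Nat),
      PySem.Chars.find.go sep s k =
        (pvSplit1 sep s).elim (-1) (fun ab => (k : Int) + ab.1.length) := by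
  intro s
  induction s with
  | nil =>
    intro k
    rw [PySem.Chars.find.go.eq_def]
    simp [pvSplit1, hsep]
  | cons c t ih =>
    intro k
    rw [PySem.Chars.find.go.eq_def]
    by_cases hpre : sep.isPrefixOf (c :: t)
    · simp [pvSplit1, hpre]
    · simp only [pvSplit1, hpre, Bool.false_eq_true, if_false, if_neg]
      rw [ih (k + 1)]
      rcases pvSplit1 sep t with _ | ab <;> simp <;> push_cast <;> ring

theorem pv_find_some {sep s : List Char} {ab : List Char × List Char} (hsep : sep ≠ [])
    (h : pvSplit1 sep s = some ab) : PySem.Chars.find s sep = (ab.1.length : Int) := by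
  have := pv_find_go_eq sep hsep s 0
  rw [h] at this
  simpa [PySem.Chars.find] using this

theorem pv_find_none {sep s : List Char} (hsep : sep ≠ [])
    (h : pvSplit1 sep s = none) : PySem.Chars.find s sep = -1 := by
  have := pv_find_go_eq sep hsep s 0
  rw [h] at this
  simpa [PySem.Chars.find] using this

theorem pv_isIn_eq (sep s : List Char) (hsep : sep ≠ []) :
    PySem.Chars.isIn sep s = (pvSplit1 sep s).isSome := by
  rcases h : pvSplit1 sep s with _ | ab
  · simp [PySem.Chars.isIn, pv_find_none hsep h]
  · simp only [PySem.Chars.isIn, pv_find_some hsep h, Option.isSome_some]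
    have : ((ab.1.length : Int)) ≠ -1 := by omega
    simpa using this

theorem pv_split1_decomp {sep : List Char} :
    ∀ {s : List Char} {ab : List Char × List Char},
      pvSplit1 sep s = some ab → s = ab.1 ++ sep ++ ab.2 := by
  intro s
  induction s with
  | nil => intro ab h; simp [pvSplit1] at h
  | cons c t ih =>
    intro ab h
    rw [pvSplit1] at h
    by_cases hpre : sep.isPrefixOf (c :: t)
    · rw [if_pos hpre] at h
      cases h
      have hp : sep <+: (c :: t) := List.isPrefixOf_iff_prefix.mp hpre
      obtain ⟨r, hr⟩ := hp
      rw [← hr]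
      simp [List.drop_left]
    · rw [if_neg hpre] at h
      rcases h2 : pvSplit1 sep t with _ | ab' <;> rw [h2] at h
      · simp at h
      · simp only [Option.map_some] at h
        cases h
        simp [ih h2]

theorem pv_split1_take {sep s : List Char} {ab : List Char × List Char} (h : pvSplit1 sep s = some ab) :
    s.take ab.1.length = ab.1 ∧ s.drop (ab.1.length + sep.length) = ab.2 := by
  have hd := pv_split1_decomp h
  constructor
  · rw [hd, List.append_assoc, List.take_left]
  · rw [hd, List.append_assoc]
    have : (ab.1 ++ (sep ++ ab.2)).drop (ab.1.length + sep.length) =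
        ((ab.1 ++ sep) ++ ab.2).drop (ab.1 ++ sep).length := by
      simp [List.append_assoc]
    rw [this, List.drop_left]

theorem pv_go0_eq (sep : List Char) (l : List Char) (fuel : Nat) (cur : List Char)
    (acc : List (List Char)) :
    PySem.Chars.splitOnMax.go sep fuel 0 l cur acc = ((cur.reverse ++ l) :: acc).reverse := by
  rw [PySem.Chars.splitOnMax.go.eq_def]
  rcases fuel with _ | fuel
  · rfl
  · rcases l with _ | ⟨c, rest⟩
    · simp
    · simp

theorem pv_go1_eq (sep : List Char) (hsep : sep ≠ []) :
    ∀ (s : List Char) (fuel : Nat) (cur : List Char) (acc : List (List Char)),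
      s.length < fuel →
      PySem.Chars.splitOnMax.go sep fuel 1 s cur acc =
        (pvSplit1 sep s).elim (((cur.reverse ++ s) :: acc).reverse)
          (fun ab => (ab.2 :: (cur.reverse ++ ab.1) :: acc).reverse) := by
  intro s
  induction s with
  | nil =>
    intro fuel cur acc hf
    rcases fuel with _ | fuel
    · omega
    · rw [PySem.Chars.splitOnMax.go.eq_def]
      simp [pvSplit1]
  | cons c t ih =>
    intro fuel cur acc hf
    rcases fuel with _ | fuel
    · omega
    · rw [PySem.Chars.splitOnMax.go.eq_def]
      simp only [Nat.succ_ne_zero, if_false, if_neg, one_ne_zero]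
      by_cases hpre : sep.isPrefixOf (c :: t)
      · rw [if_pos hpre]
        have : (1 : Nat) - 1 = 0 := rfl
        rw [this, pv_go0_eq]
        simp [pvSplit1, hpre]
      · rw [if_neg hpre]
        rw [ih fuel (c :: cur) acc (by simpa using Nat.lt_succ_iff.mp hf)]
        simp only [pvSplit1, hpre, Bool.false_eq_true, if_false, if_neg]
        rcases pvSplit1 sep t with _ | ab <;> simp

theorem pv_splitMax1 (s sep : List Char) (hsep : sep ≠ []) :
    PySem.Chars.splitMax? s sep 1 =
      some ((pvSplit1 sep s).elim [s] (fun ab => [ab.1, ab.2])) := by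
  rw [PySem.Chars.splitMax?]
  rw [if_neg (by simpa using hsep)]
  rw [PySem.Chars.splitOnMax]
  rw [if_neg (by norm_num)]
  have h1 : ((1 : Int)).toNat = 1 := rfl
  rw [h1, pv_go1_eq sep hsep s (s.length + 1) [] [] (by omega)]
  rcases pvSplit1 sep s with _ | ab <;> simp

-- ---------- occurrence-straddling lemmas ----------

theorem pv_prefix_break {sep p u : List Char} {c : Char}
    (hnb : ∀ x ∈ sep, pvNB x = true) (hc : pvNB c = false)
    (h : sep <+: p ++ c :: u) : sep <+: p := by
  by_cases hle : sep.length ≤ p.length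
  · have := List.prefix_iff_eq_take.mp h
    rw [List.take_append_of_le_length hle] at this
    exact List.prefix_iff_eq_take.mpr this
  · exfalso
    have hlt : p.length < sep.length := by omega
    have hlen : p.length < (p ++ c :: u).length := by simp
    have hget := List.IsPrefix.getElem h (i := p.length) hlt
    have : (p ++ c :: u)[p.length]'hlen = c := by
      rw [List.getElem_append_right (le_refl p.length)]
      simp
    have hcs : sep[p.length]'hlt = c := hget.trans this
    have hmem : c ∈ sep := hcs ▸ List.getElem_mem _
    rw [hnb c hmem] at hc
    cases hc

theorem pv_split1_cons_break (sep u : List Char) (c : Char) (hsep : sep ≠ [])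
    (hnb : ∀ x ∈ sep, pvNB x = true) (hc : pvNB c = false) :
    pvSplit1 sep (c :: u) = (pvSplit1 sep u).map (fun ab => (c :: ab.1, ab.2)) := by
  have hpre : ¬ sep.isPrefixOf (c :: u) = true := by
    intro hp
    rcases sep with _ | ⟨d, sep'⟩
    · exact hsep rfl
    · have := List.isPrefixOf_iff_prefix.mp hp
      obtain ⟨r, hr⟩ := this
      injection hr with e1 e2
      rw [← e1] at hc
      rw [hnb d (by simp)] at hc
      cases hc
  rw [pvSplit1, if_neg hpre]

theorem pv_split1_append_break (sep u : List Char) (c : Char) (hsep : sep ≠ [])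
    (hnb : ∀ x ∈ sep, pvNB x = true) (hc : pvNB c = false) :
    ∀ (p : List Char), (∀ x ∈ p, pvNB x = true) →
      pvSplit1 sep (p ++ c :: u) =
        (pvSplit1 sep p).elim ((pvSplit1 sep (c :: u)).map (fun ab => (p ++ ab.1, ab.2)))
          (fun ab => some (ab.1, ab.2 ++ c :: u)) := by
  intro p
  induction p with
  | nil =>
    intro _
    simp only [List.nil_append, pvSplit1, Option.elim]
    rcases pvSplit1 sep (c :: u) with _ | ab <;> simp
  | cons d p' ih =>
    intro hp
    by_cases hpre : sep.isPrefixOf (d :: p')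
    · have hpre2 : sep.isPrefixOf ((d :: p') ++ c :: u) = true := by
        rw [List.isPrefixOf_iff_prefix] at *
        exact hpre.trans (List.prefix_append _ _)
      have hle : sep.length ≤ (d :: p').length :=
        (List.isPrefixOf_iff_prefix.mp hpre).length_le
      rw [List.cons_append, pvSplit1, ← List.cons_append, if_pos hpre2]
      rw [pvSplit1, if_pos hpre]
      simp only [Option.elim_some]
      rw [List.drop_append_of_le_length hle]
    · have hpre2 : ¬ sep.isPrefixOf ((d :: p') ++ c :: u) = true := by
        intro hp2
        exact hpre (List.isPrefixOf_iff_prefix.mpr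
          (pv_prefix_break hnb hc (List.isPrefixOf_iff_prefix.mp hp2)))
      rw [List.cons_append, pvSplit1, ← List.cons_append, if_neg hpre2]
      rw [pvSplit1, if_neg hpre]
      rw [List.cons_append] at *
      rw [ih (fun x hx => hp x (List.mem_cons_of_mem _ hx))]
      rcases pvSplit1 sep p' with _ | ab
      · rcases pvSplit1 sep (c :: u) with _ | ab2 <;> simp
      · simp


-- ---------- marker facts ----------

theorem pv_open_ne : pvOPEN ≠ [] := by decide
theorem pv_close_ne : pvCLOSE ≠ [] := by decide
set_option maxRecDepth 10000 in
theorem pv_open_nb_all : pvOPEN.all pvNB = true := by decide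

theorem pv_open_nb : ∀ x ∈ pvOPEN, pvNB x = true :=
  fun x hx => List.all_eq_true.mp pv_open_nb_all x hx
set_option maxRecDepth 10000 in
theorem pv_close_nb_all : pvCLOSE.all pvNB = true := by decide

theorem pv_close_nb : ∀ x ∈ pvCLOSE, pvNB x = true :=
  fun x hx => List.all_eq_true.mp pv_close_nb_all x hx
theorem pv_open_len : pvOPEN.length = 14 := by decide

theorem pv_ne_cr_of_isB {c : Char} (h : pvIsB c = false) : c ≠ '\r' := by
  rintro rfl; exact absurd h (by decide)

-- ---------- string-level helper lemmas ----------

theorem pv_dropWhile_cr {l : List Char} (h : ∀ c ∈ l, c ≠ '\r') :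
    l.dropWhile (fun c => c == '\r') = l := by
  cases l with
  | nil => rfl
  | cons c t =>
    rw [List.dropWhile_cons, if_neg (by simp [h c (by simp)])]

theorem pv_rstrip_id {l : List Char} (h : ∀ c ∈ l, c ≠ '\r') :
    pvRstripCR (String.ofList l) = String.ofList l := by
  unfold pvRstripCR
  rw [String.toList_ofList, pv_dropWhile_cr (fun c hc => h c (List.mem_reverse.mp hc))]
  simp

theorem pv_ofList_eq_empty {l : List Char} : String.ofList l = "" ↔ l = [] := by
  constructor
  · intro h
    have := congrArg String.toList h
    simpa using this
  · rintro rfl; rfl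

theorem pv_pyGet_two_one {α : Type} (x y : α) : PySem.List.pyGet? [x, y] 1 = some y := by
  simp [PySem.List.pyGet?, PySem.List.pyIdx?]

theorem pv_pyGet_two_zero {α : Type} (x y : α) : PySem.List.pyGet? [x, y] 0 = some x := by
  simp [PySem.List.pyGet?, PySem.List.pyIdx?]

theorem pv_isIn_open (l : List Char) :
    PySem.Str.isIn "R\"PINYIN_DICT(" (String.ofList l) = (pvSplit1 pvOPEN l).isSome := by
  have : PySem.Str.isIn "R\"PINYIN_DICT(" (String.ofList l) = PySem.Chars.isIn pvOPEN l := by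
    simp [PySem.Str.isIn, pvOPEN]
  rw [this, pv_isIn_eq _ _ pv_open_ne]

theorem pv_isIn_close (l : List Char) :
    PySem.Str.isIn ")PINYIN_DICT\"" (String.ofList l) = (pvSplit1 pvCLOSE l).isSome := by
  have : PySem.Str.isIn ")PINYIN_DICT\"" (String.ofList l) = PySem.Chars.isIn pvCLOSE l := by
    simp [PySem.Str.isIn, pvCLOSE]
  rw [this, pv_isIn_eq _ _ pv_close_ne]

theorem pv_split_open {l : List Char} {ab : List Char × List Char}
    (h : pvSplit1 pvOPEN l = some ab) :
    (PySem.List.pyGet? ((PySem.Str.splitMax? (String.ofList l) "R\"PINYIN_DICT(" 1).getD []) 1).getD ""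
      = String.ofList ab.2 := by
  have hsm : PySem.Str.splitMax? (String.ofList l) "R\"PINYIN_DICT(" 1 =
      (PySem.Chars.splitMax? l pvOPEN 1).map (List.map String.ofList) := by
    simp [PySem.Str.splitMax?, pvOPEN]
  rw [hsm, pv_splitMax1 _ _ pv_open_ne, h]
  simp [pv_pyGet_two_one]

theorem pv_split_close {l : List Char} {ab : List Char × List Char}
    (h : pvSplit1 pvCLOSE l = some ab) :
    (PySem.List.pyGet? ((PySem.Str.splitMax? (String.ofList l) ")PINYIN_DICT\"" 1).getD []) 0).getD ""
      = String.ofList ab.1 := by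
  have hsm : PySem.Str.splitMax? (String.ofList l) ")PINYIN_DICT\"" 1 =
      (PySem.Chars.splitMax? l pvCLOSE 1).map (List.map String.ofList) := by
    simp [PySem.Str.splitMax?, pvCLOSE]
  rw [hsm, pv_splitMax1 _ _ pv_close_ne, h]
  simp [pv_pyGet_two_zero]

-- ---------- bridges between the String ports and the chars-level models ----------

theorem pv_bridge_phase2 (L : List (List Char)) (hL : ∀ l ∈ L, ∀ c ∈ l, pvIsB c = false) :
    pvIterLoop (L.map String.ofList) true = (pvPhase2 L).map String.ofList := by
  induction L with
  | nil => rfl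
  | cons l L ih =>
    have hrs : pvRstripCR (String.ofList l) = String.ofList l :=
      pv_rstrip_id (fun c hc => pv_ne_cr_of_isB (hL l (by simp) c hc))
    rw [List.map_cons, pvIterLoop]
    simp only [hrs, Bool.not_true, Bool.false_and, Bool.false_eq_true, if_neg, if_true,
      Bool.and_self, if_false, ite_true, ite_false, reduceIte]
    rw [pv_isIn_close]
    rcases hcl : pvSplit1 pvCLOSE l with _ | ab
    · simp only [Option.isSome_none, Bool.false_eq_true, if_false, reduceIte]
      rw [ih (fun l' hl' => hL l' (List.mem_cons_of_mem _ hl'))]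
      simp [pvPhase2, hcl]
    · simp only [Option.isSome_some, if_true, reduceIte]
      rw [pv_split_close hcl]
      simp only [pvPhase2, hcl]
      by_cases hab : ab.1 = []
      · simp [hab, pv_ofList_eq_empty]
      · rw [if_pos (by simpa [pv_ofList_eq_empty] using hab), if_pos hab]
        rfl

theorem pv_bridge_A (L : List (List Char)) (hL : ∀ l ∈ L, ∀ c ∈ l, pvIsB c = false) :
    pvIterLoop (L.map String.ofList) false = (pvA1 L).map String.ofList := by
  induction L with
  | nil => rfl
  | cons l L ih =>
    have hrs : pvRstripCR (String.ofList l) = String.ofList l :=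
      pv_rstrip_id (fun c hc => pv_ne_cr_of_isB (hL l (by simp) c hc))
    rw [List.map_cons, pvIterLoop]
    simp only [hrs, Bool.not_false, Bool.true_and]
    rw [pv_isIn_open]
    rcases hop : pvSplit1 pvOPEN l with _ | ab
    · simp only [Option.isSome_none, Bool.not_false, if_true, reduceIte]
      rw [ih (fun l' hl' => hL l' (List.mem_cons_of_mem _ hl'))]
      simp [pvA1, hop]
    · simp only [Option.isSome_some, Bool.not_true, Bool.false_eq_true, if_false, reduceIte]
      rw [pv_split_open hop]
      have hab2 : ∀ c ∈ ab.2, pvIsB c = false := by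
        intro c hc
        have hdec := pv_split1_decomp hop
        exact hL l (by simp) c (by rw [hdec]; simp [hc])
      have hL2 : ∀ l' ∈ ab.2 :: L, ∀ c ∈ l', pvIsB c = false := by
        intro l' hl'
        rcases List.mem_cons.mp hl' with rfl | h
        · exact hab2
        · exact hL l' (List.mem_cons_of_mem _ h)
      have := pv_bridge_phase2 (ab.2 :: L) hL2
      rw [List.map_cons, pvIterLoop] at this
      have hrs2 : pvRstripCR (String.ofList ab.2) = String.ofList ab.2 :=
        pv_rstrip_id (fun c hc => pv_ne_cr_of_isB (hab2 c hc))
      simp only [hrs2, Bool.not_true, Bool.false_and, Bool.false_eq_true, if_false, reduceIte] at this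
      rw [this]
      simp [pvA1, hop]


theorem pv_str_splitlines (l : List Char) :
    PySem.Str.splitlines (String.ofList l) = (PySem.Chars.splitlines l).map String.ofList := by
  simp [PySem.Str.splitlines]

theorem pv_B_eq (s : String) :
    iter_candidate_lines_alt s = (pvBchars s.toList).map String.ofList := by
  unfold iter_candidate_lines_alt pvBchars
  dsimp only
  have hfind : PySem.Str.find s "R\"PINYIN_DICT(" = PySem.Chars.find s.toList pvOPEN := by
    simp [PySem.Str.find, pvOPEN]
  rcases hop : pvSplit1 pvOPEN s.toList with _ | ab
  · rw [hfind, pv_find_none pv_open_ne hop]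
    simp
  · have hf := pv_find_some pv_open_ne hop
    rw [hfind, hf]
    rw [if_neg (by simp)]
    have hdec := pv_split1_decomp hop
    have hbodyL : (PySem.Str.slice s (some ((ab.1.length : Int) + 14)) none).toList = ab.2 := by
      simp only [PySem.Str.slice, String.toList_ofList, PySem.Chars.slice_eq_listSlice]
      rw [PySem.List.slice_from _ (by omega)]
      have h14 : ((ab.1.length : Int) + 14).toNat = ab.1.length + 14 := by omega
      rw [h14, hdec]
      have hlen : (ab.1 ++ pvOPEN).length = ab.1.length + 14 := by simp [pv_open_len]
      rw [List.append_assoc, ← List.append_assoc, ← hlen, List.drop_left]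
    have hbody : PySem.Str.slice s (some ((ab.1.length : Int) + 14)) none = String.ofList ab.2 := by
      rw [← String.ofList_toList (s := PySem.Str.slice s (some ((ab.1.length : Int) + 14)) none), hbodyL]
    rw [hbody]
    have hfind2 : PySem.Str.find (String.ofList ab.2) ")PINYIN_DICT\"" =
        PySem.Chars.find ab.2 pvCLOSE := by
      simp [PySem.Str.find, pvCLOSE]
    rcases hcl : pvSplit1 pvCLOSE ab.2 with _ | cd
    · rw [hfind2, pv_find_none pv_close_ne hcl]
      simp only [bne_self_eq_false, Bool.false_eq_true, if_false, reduceIte]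
      simp [pvB2, hcl, pv_str_splitlines]
    · have hf2 := pv_find_some pv_close_ne hcl
      rw [hfind2, hf2]
      rw [if_pos (by simp)]
      have htake := (pv_split1_take hcl).1
      have hsl : PySem.Str.slice (String.ofList ab.2) none (some ((cd.1.length : Int))) =
          String.ofList cd.1 := by
        rw [← String.ofList_toList
              (s := PySem.Str.slice (String.ofList ab.2) none (some ((cd.1.length : Int))))]
        simp only [PySem.Str.slice, String.toList_ofList, PySem.Chars.slice_eq_listSlice]
        rw [PySem.List.slice_to _ (by omega)]
        simp [htake]
      rw [hsl]
      simp [pvB2, hcl, pv_str_splitlines]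


theorem pv_dropWhile_head :
    ∀ (l : List Char) (c : Char) (t : List Char), l.dropWhile pvNB = c :: t → pvNB c = false := by
  intro l
  induction l with
  | nil => intro c t h; simp at h
  | cons d l' ih =>
    intro c t h
    rw [List.dropWhile_cons] at h
    by_cases hd : pvNB d = true
    · rw [if_pos hd] at h; exact ih c t h
    · rw [if_neg hd] at h
      injection h with e1 e2
      rw [← e1]
      simpa using hd

theorem pv_M2_core (p brk t : List Char)
    (hpB : ∀ x ∈ p, pvIsB x = false)
    (hp : ∀ x ∈ p, pvNB x = true)
    (c : Char) (u : List Char)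
    (hcu : brk ++ t = c :: u)
    (hcnb : pvNB c = false)
    (hK : pvSplit1 pvCLOSE (brk ++ t) = (pvSplit1 pvCLOSE t).map (fun ab => (brk ++ ab.1, ab.2)))
    (hsl : ∀ (x y : List Char), (∀ ch ∈ x, pvIsB ch = false) → y <+: t →
        PySem.Chars.splitlines (x ++ (brk ++ y)) = x :: PySem.Chars.splitlines y)
    (IH : pvPhase2 (PySem.Chars.splitlines t) = pvB2 t) :
    pvPhase2 (PySem.Chars.splitlines (p ++ (brk ++ t))) = pvB2 (p ++ (brk ++ t)) := by
  rw [hsl p t hpB (List.prefix_refl t)]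
  have hKp := pv_split1_append_break pvCLOSE u c pv_close_ne pv_close_nb hcnb p hp
  rw [← hcu] at hKp
  rcases hpcl : pvSplit1 pvCLOSE p with _ | ab
  · rw [hpcl] at hKp
    simp only [Option.elim_none] at hKp
    rw [hK] at hKp
    simp only [pvPhase2, hpcl]
    rcases htt : pvSplit1 pvCLOSE t with _ | cd
    · rw [htt] at hKp
      simp only [Option.map_none] at hKp
      simp only [pvB2, hKp]
      rw [hsl p t hpB (List.prefix_refl t), IH]
      simp only [pvB2, htt]
    · rw [htt] at hKp
      simp only [Option.map_some] at hKp
      simp only [pvB2, hKp]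
      have hpref : cd.1 <+: t := by
        refine ⟨pvCLOSE ++ cd.2, ?_⟩
        rw [← List.append_assoc]
        exact (pv_split1_decomp htt).symm
      rw [hsl p cd.1 hpB hpref, IH]
      simp only [pvB2, htt]
  · rw [hpcl] at hKp
    simp only [Option.elim_some] at hKp
    simp only [pvPhase2, hpcl, pvB2, hKp]
    have hsub : ∀ ch ∈ ab.1, pvIsB ch = false := by
      intro ch hc
      exact hpB ch (by rw [pv_split1_decomp hpcl]; simp [hc])
    by_cases hab : ab.1 = []
    · rw [if_neg (by simp [hab]), hab, pv_splitlines_nil]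
    · rw [if_pos hab, pv_splitlines_nb ab.1 hsub hab]

theorem pv_M2_aux : ∀ (n : Nat) (body : List Char), body.length ≤ n →
    (∀ c ∈ body, pvDomChar c = true) →
    pvPhase2 (PySem.Chars.splitlines body) = pvB2 body := by
  intro n
  induction n with
  | zero =>
    intro body hlen _
    have hb : body = [] := List.eq_nil_of_length_eq_zero (Nat.le_zero.mp hlen)
    subst hb
    rfl
  | succ n ih =>
    intro body hlen hdom
    have hsplit := List.takeWhile_append_dropWhile (p := pvNB) (l := body)
    rcases hr : body.dropWhile pvNB with _ | ⟨c, t0⟩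
    · -- no line break in body
      have hnb : ∀ c ∈ body, pvNB c = true := by
        intro c hc
        rw [← hsplit, hr, List.append_nil] at hc
        exact List.mem_takeWhile_imp hc
      have hIsB : ∀ c ∈ body, pvIsB c = false := fun c hc => pv_isB_dom (hdom c hc) (hnb c hc)
      by_cases hb : body = []
      · subst hb; rfl
      · rw [pv_splitlines_nb body hIsB hb]
        simp only [pvPhase2]
        rcases hcl : pvSplit1 pvCLOSE body with _ | ab
        · simp only [pvB2, hcl]
          rw [pv_splitlines_nb body hIsB hb]
        · simp only [pvB2, hcl]
          have hsub : ∀ c ∈ ab.1, pvIsB c = false := by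
            intro c hc
            exact hIsB c (by rw [pv_split1_decomp hcl]; simp [hc])
          by_cases hab : ab.1 = []
          · rw [if_neg (by simp [hab]), hab, pv_splitlines_nil]
          · rw [if_pos hab, pv_splitlines_nb ab.1 hsub hab]
    · -- body = p ++ c :: t0 with c a line break
      have hcnb : pvNB c = false := pv_dropWhile_head body c t0 hr
      have hbody : body = body.takeWhile pvNB ++ c :: t0 := by
        conv_lhs => rw [← hsplit]
        rw [hr]
      have hp : ∀ x ∈ body.takeWhile pvNB, pvNB x = true := fun x hx => List.mem_takeWhile_imp hx
      have hpB : ∀ x ∈ body.takeWhile pvNB, pvIsB x = false := by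
        intro x hx
        exact pv_isB_dom (hdom x (by rw [hbody]; exact List.mem_append_left _ hx)) (hp x hx)
      have hdom_t0 : ∀ x ∈ t0, pvDomChar x = true := by
        intro x hx
        exact hdom x (by rw [hbody]; exact List.mem_append_right _ (List.mem_cons_of_mem _ hx))
      have hlen_p : (body.takeWhile pvNB).length + (c :: t0).length = body.length := by
        conv_rhs => rw [hbody]
        simp
    -- three break shapes
      rcases pv_nb_false.mp hcnb with hc | hc
      · -- '\n'
        subst hc
        rw [hbody, show (body.takeWhile pvNB) ++ '\n' :: t0 = (body.takeWhile pvNB) ++ (['\n'] ++ t0) from rfl]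
        refine pv_M2_core _ _ _ hpB hp '\n' t0 rfl (by decide) ?_ ?_ ?_
        · rw [List.singleton_append]
          rw [pv_split1_cons_break pvCLOSE t0 '\n' pv_close_ne pv_close_nb (by decide)]
          rcases pvSplit1 pvCLOSE t0 with _ | cd <;> simp
        · intro x y hx _
          rw [List.singleton_append]
          exact pv_splitlines_nl x y hx
        · exact ih t0 (by simp at hlen_p; omega) hdom_t0
      · -- '\r'
        subst hc
        rcases t0 with _ | ⟨d, t1⟩
        · -- '\r' at the very end
          rw [hbody, show (body.takeWhile pvNB) ++ '\r' :: ([] : List Char) = (body.takeWhile pvNB) ++ (['\r'] ++ []) from rfl]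
          refine pv_M2_core _ _ _ hpB hp '\r' [] rfl (by decide) ?_ ?_ ?_
          · rw [List.singleton_append]
            rw [pv_split1_cons_break pvCLOSE [] '\r' pv_close_ne pv_close_nb (by decide)]
            rcases pvSplit1 pvCLOSE [] with _ | cd <;> simp
          · intro x y hx hy
            have hy0 : y = [] := List.prefix_nil.mp hy
            subst hy0
            rw [List.singleton_append]
            exact pv_splitlines_cr x [] hx (fun u h => by cases h)
          · exact ih [] (by simp) (by intro x hx; cases hx)
        · by_cases hd : d = '\n'
          · -- "\r\n"
            subst hd
            rw [hbody, show (body.takeWhile pvNB) ++ '\r' :: '\n' :: t1 = (body.takeWhile pvNB) ++ (['\r', '\n'] ++ t1) from rfl]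
            refine pv_M2_core _ _ _ hpB hp '\r' ('\n' :: t1) rfl (by decide) ?_ ?_ ?_
            · rw [show (['\r', '\n'] : List Char) ++ t1 = '\r' :: ('\n' :: t1) from rfl]
              rw [pv_split1_cons_break pvCLOSE ('\n' :: t1) '\r' pv_close_ne pv_close_nb (by decide)]
              rw [pv_split1_cons_break pvCLOSE t1 '\n' pv_close_ne pv_close_nb (by decide)]
              rcases pvSplit1 pvCLOSE t1 with _ | cd <;> simp
            · intro x y hx _
              rw [show (['\r', '\n'] : List Char) ++ y = '\r' :: '\n' :: y from rfl]
              exact pv_splitlines_crlf x y hx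
            · refine ih t1 (by simp at hlen_p; omega) ?_
              intro x hx
              exact hdom_t0 x (List.mem_cons_of_mem _ hx)
          · -- lone '\r' followed by a non-'\n' char
            rw [hbody, show (body.takeWhile pvNB) ++ '\r' :: d :: t1 = (body.takeWhile pvNB) ++ (['\r'] ++ (d :: t1)) from rfl]
            refine pv_M2_core _ _ _ hpB hp '\r' (d :: t1) rfl (by decide) ?_ ?_ ?_
            · rw [List.singleton_append]
              rw [pv_split1_cons_break pvCLOSE (d :: t1) '\r' pv_close_ne pv_close_nb (by decide)]
              rcases pvSplit1 pvCLOSE (d :: t1) with _ | cd <;> simp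
            · intro x y hx hy
              rw [List.singleton_append]
              refine pv_splitlines_cr x y hx ?_
              intro u hu
              subst hu
              obtain ⟨r, hrr⟩ := hy
              rw [List.cons_append] at hrr
              injection hrr with e1 e2
              exact hd e1.symm
            · exact ih (d :: t1) (by simp at hlen_p ⊢; omega) hdom_t0

theorem pv_M2 (body : List Char) (hdom : ∀ c ∈ body, pvDomChar c = true) :
    pvPhase2 (PySem.Chars.splitlines body) = pvB2 body :=
  pv_M2_aux body.length body (le_refl _) hdom


theorem pv_break_view (body : List Char) (c : Char) (t0 : List Char)
    (hr : body.dropWhile pvNB = c :: t0) :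
    ∃ brk t, body = body.takeWhile pvNB ++ (brk ++ t) ∧
      (∃ c' u, brk ++ t = c' :: u ∧ pvNB c' = false) ∧
      (∀ sep, sep ≠ [] → (∀ x ∈ sep, pvNB x = true) →
        pvSplit1 sep (brk ++ t) = (pvSplit1 sep t).map (fun ab => (brk ++ ab.1, ab.2))) ∧
      (∀ x y, (∀ ch ∈ x, pvIsB ch = false) → y <+: t →
        PySem.Chars.splitlines (x ++ (brk ++ y)) = x :: PySem.Chars.splitlines y) ∧
      (∀ ch ∈ t, ch ∈ body) ∧
      t.length < body.length := by
  have hcnb := pv_dropWhile_head body c t0 hr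
  have hsplit := List.takeWhile_append_dropWhile (p := pvNB) (l := body)
  have hbody : body = body.takeWhile pvNB ++ c :: t0 := by
    conv_lhs => rw [← hsplit]
    rw [hr]
  have hlen_p : (body.takeWhile pvNB).length + (c :: t0).length = body.length := by
    conv_rhs => rw [hbody]
    simp
  rcases pv_nb_false.mp hcnb with hc | hc
  · subst hc
    refine ⟨['\n'], t0, by rw [List.singleton_append]; exact hbody, ⟨'\n', t0, rfl, by decide⟩,
      ?_, ?_, ?_, by simp at hlen_p; omega⟩
    · intro sep hne hnb
      rw [List.singleton_append, pv_split1_cons_break sep t0 '\n' hne hnb (by decide)]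
      rcases pvSplit1 sep t0 with _ | cd <;> simp
    · intro x y hx _
      rw [List.singleton_append]
      exact pv_splitlines_nl x y hx
    · intro ch hc2
      rw [hbody]
      exact List.mem_append_right _ (List.mem_cons_of_mem _ hc2)
  · subst hc
    rcases t0 with _ | ⟨d, t1⟩
    · refine ⟨['\r'], [], ?_, ⟨'\r', [], rfl, by decide⟩, ?_, ?_, ?_, ?_⟩
      · rw [List.singleton_append]; simpa using hbody
      · intro sep hne hnb
        rw [List.singleton_append, pv_split1_cons_break sep [] '\r' hne hnb (by decide)]
        rcases pvSplit1 sep [] with _ | cd <;> simp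
      · intro x y hx hy
        have hy0 : y = [] := List.prefix_nil.mp hy
        subst hy0
        rw [List.singleton_append]
        exact pv_splitlines_cr x [] hx (fun u h => by cases h)
      · intro ch hc2; cases hc2
      · simp at hlen_p ⊢; omega
    · by_cases hd : d = '\n'
      · subst hd
        refine ⟨['\r', '\n'], t1, by simpa using hbody, ⟨'\r', '\n' :: t1, rfl, by decide⟩,
          ?_, ?_, ?_, by simp at hlen_p ⊢; omega⟩
        · intro sep hne hnb
          rw [show (['\r', '\n'] : List Char) ++ t1 = '\r' :: ('\n' :: t1) from rfl]
          rw [pv_split1_cons_break sep ('\n' :: t1) '\r' hne hnb (by decide)]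
          rw [pv_split1_cons_break sep t1 '\n' hne hnb (by decide)]
          rcases pvSplit1 sep t1 with _ | cd <;> simp
        · intro x y hx _
          rw [show (['\r', '\n'] : List Char) ++ y = '\r' :: '\n' :: y from rfl]
          exact pv_splitlines_crlf x y hx
        · intro ch hc2
          rw [hbody]
          exact List.mem_append_right _ (List.mem_cons_of_mem _ (List.mem_cons_of_mem _ hc2))
      · refine ⟨['\r'], d :: t1, by rw [List.singleton_append]; exact hbody,
          ⟨'\r', d :: t1, rfl, by decide⟩, ?_, ?_, ?_, by simp at hlen_p ⊢; omega⟩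
        · intro sep hne hnb
          rw [List.singleton_append, pv_split1_cons_break sep (d :: t1) '\r' hne hnb (by decide)]
          rcases pvSplit1 sep (d :: t1) with _ | cd <;> simp
        · intro x y hx hy
          rw [List.singleton_append]
          refine pv_splitlines_cr x y hx ?_
          intro u hu
          subst hu
          obtain ⟨r, hrr⟩ := hy
          rw [List.cons_append] at hrr
          injection hrr with e1 e2
          exact hd e1.symm
        · intro ch hc2
          rw [hbody]
          exact List.mem_append_right _ (List.mem_cons_of_mem _ hc2)

theorem pv_M1_core (p brk t : List Char)
    (hpB : ∀ x ∈ p, pvIsB x = false)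
    (hp : ∀ x ∈ p, pvNB x = true)
    (c : Char) (u : List Char)
    (hcu : brk ++ t = c :: u)
    (hcnb : pvNB c = false)
    (hK : pvSplit1 pvOPEN (brk ++ t) = (pvSplit1 pvOPEN t).map (fun ab => (brk ++ ab.1, ab.2)))
    (hsl : ∀ (x : List Char), (∀ ch ∈ x, pvIsB ch = false) →
        PySem.Chars.splitlines (x ++ (brk ++ t)) = x :: PySem.Chars.splitlines t)
    (hdom : ∀ ch ∈ p ++ (brk ++ t), pvDomChar ch = true)
    (hnd : ∀ a, pvSplit1 pvOPEN (p ++ (brk ++ t)) ≠ some (a, []))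
    (IH : (∀ a, pvSplit1 pvOPEN t ≠ some (a, [])) →
        pvA1 (PySem.Chars.splitlines t) = pvBchars t) :
    pvA1 (PySem.Chars.splitlines (p ++ (brk ++ t))) = pvBchars (p ++ (brk ++ t)) := by
  rw [hsl p hpB]
  have hKp := pv_split1_append_break pvOPEN u c pv_open_ne pv_open_nb hcnb p hp
  rw [← hcu] at hKp
  rcases hpop : pvSplit1 pvOPEN p with _ | ab
  · rw [hpop] at hKp
    simp only [Option.elim_none] at hKp
    rw [hK] at hKp
    simp only [pvA1, hpop]
    rcases htt : pvSplit1 pvOPEN t with _ | cd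
    · rw [htt] at hKp
      simp only [Option.map_none] at hKp
      simp only [pvBchars, hKp]
      rw [IH (by intro a h; rw [htt] at h; cases h)]
      simp only [pvBchars, htt]
    · rw [htt] at hKp
      simp only [Option.map_some] at hKp
      simp only [pvBchars, hKp]
      have hcd2 : cd.2 ≠ [] := by
        intro h0
        exact hnd (p ++ (brk ++ cd.1)) (by rw [hKp, h0])
      rw [IH ?_]
      · simp only [pvBchars, htt]
      · intro a h
        rw [htt] at h
        injection h with e
        exact hcd2 (by rw [e])
  · rw [hpop] at hKp
    simp only [Option.elim_some] at hKp
    simp only [pvA1, hpop, pvBchars, hKp]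
    have hab2B : ∀ ch ∈ ab.2, pvIsB ch = false := by
      intro ch hc2
      exact hpB ch (by rw [pv_split1_decomp hpop]; simp [hc2])
    have hdomb : ∀ ch ∈ ab.2 ++ (brk ++ t), pvDomChar ch = true := by
      intro ch hc2
      rcases List.mem_append.mp hc2 with h1 | h2
      · exact hdom ch (List.mem_append_left _ (by rw [pv_split1_decomp hpop]; simp [h1]))
      · exact hdom ch (List.mem_append_right _ h2)
    have hM := pv_M2 (ab.2 ++ (brk ++ t)) hdomb
    rw [hsl ab.2 hab2B] at hM
    exact hM

theorem pv_M1_aux : ∀ (n : Nat) (s : List Char), s.length ≤ n →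
    (∀ c ∈ s, pvDomChar c = true) →
    (∀ a, pvSplit1 pvOPEN s ≠ some (a, [])) →
    pvA1 (PySem.Chars.splitlines s) = pvBchars s := by
  intro n
  induction n with
  | zero =>
    intro s hlen _ _
    have hs : s = [] := List.eq_nil_of_length_eq_zero (Nat.le_zero.mp hlen)
    subst hs
    rfl
  | succ n ih =>
    intro s hlen hdom hnd
    rcases hr : s.dropWhile pvNB with _ | ⟨c, t0⟩
    · -- no line break in s
      have hnb : ∀ c ∈ s, pvNB c = true := by
        intro c hc
        have hsplit := List.takeWhile_append_dropWhile (p := pvNB) (l := s)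
        rw [← hsplit, hr, List.append_nil] at hc
        exact List.mem_takeWhile_imp hc
      have hIsB : ∀ c ∈ s, pvIsB c = false := fun c hc => pv_isB_dom (hdom c hc) (hnb c hc)
      rcases hop : pvSplit1 pvOPEN s with _ | ab
      · by_cases hs : s = []
        · subst hs; rfl
        · rw [pv_splitlines_nb s hIsB hs]
          simp [pvA1, hop, pvBchars]
      · have hs : s ≠ [] := by
          intro h0; rw [h0] at hop; cases hop
        have hab2 : ab.2 ≠ [] := by
          intro h0
          exact hnd ab.1 (by rw [hop, ← h0])
        have hab2B : ∀ ch ∈ ab.2, pvIsB ch = false := by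
          intro ch hc2
          exact hIsB ch (by rw [pv_split1_decomp hop]; simp [hc2])
        have hdom2 : ∀ ch ∈ ab.2, pvDomChar ch = true := by
          intro ch hc2
          exact hdom ch (by rw [pv_split1_decomp hop]; simp [hc2])
        rw [pv_splitlines_nb s hIsB hs]
        simp only [pvA1, hop, pvBchars]
        have hM := pv_M2 ab.2 hdom2
        rw [pv_splitlines_nb ab.2 hab2B hab2] at hM
        exact hM
    · obtain ⟨brk, t, hbody, ⟨c', u, hcu, hcnb⟩, hKgen, hslgen, hmem, hlt⟩ :=
        pv_break_view s c t0 hr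
      rw [hbody]
      have hp : ∀ x ∈ s.takeWhile pvNB, pvNB x = true := fun x hx => List.mem_takeWhile_imp hx
      have hpB : ∀ x ∈ s.takeWhile pvNB, pvIsB x = false := by
        intro x hx
        refine pv_isB_dom (hdom x ?_) (hp x hx)
        rw [hbody]
        exact List.mem_append_left _ hx
      refine pv_M1_core _ _ _ hpB hp c' u hcu hcnb
        (hKgen pvOPEN pv_open_ne pv_open_nb)
        (fun x hx => hslgen x t hx (List.prefix_refl t))
        (by rw [← hbody]; exact hdom)
        (by rw [← hbody]; exact hnd)
        (fun h => ih t (by omega) (fun ch hc2 => hdom ch (hmem ch hc2)) h)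

theorem pv_MD_aux : ∀ (n : Nat) (s : List Char), s.length ≤ n →
    (∀ c ∈ s, pvDomChar c = true) →
    (∃ a, pvSplit1 pvOPEN s = some (a, [])) →
    pvA1 (PySem.Chars.splitlines s) = [[]] := by
  intro n
  induction n with
  | zero =>
    intro s hlen _ hex
    have hs : s = [] := List.eq_nil_of_length_eq_zero (Nat.le_zero.mp hlen)
    subst hs
    obtain ⟨a, ha⟩ := hex
    cases ha
  | succ n ih =>
    intro s hlen hdom hex
    obtain ⟨a, ha⟩ := hex
    rcases hr : s.dropWhile pvNB with _ | ⟨c, t0⟩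
    · have hnb : ∀ c ∈ s, pvNB c = true := by
        intro c hc
        have hsplit := List.takeWhile_append_dropWhile (p := pvNB) (l := s)
        rw [← hsplit, hr, List.append_nil] at hc
        exact List.mem_takeWhile_imp hc
      have hIsB : ∀ c ∈ s, pvIsB c = false := fun c hc => pv_isB_dom (hdom c hc) (hnb c hc)
      have hs : s ≠ [] := by
        intro h0; rw [h0] at ha; cases ha
      rw [pv_splitlines_nb s hIsB hs]
      simp [pvA1, ha, pvPhase2, pvSplit1]
    · obtain ⟨brk, t, hbody, ⟨c', u, hcu, hcnb⟩, hKgen, hslgen, hmem, hlt⟩ :=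
        pv_break_view s c t0 hr
      have hp : ∀ x ∈ s.takeWhile pvNB, pvNB x = true := fun x hx => List.mem_takeWhile_imp hx
      have hpB : ∀ x ∈ s.takeWhile pvNB, pvIsB x = false := by
        intro x hx
        refine pv_isB_dom (hdom x ?_) (hp x hx)
        rw [hbody]
        exact List.mem_append_left _ hx
      have hKp := pv_split1_append_break pvOPEN u c' pv_open_ne pv_open_nb hcnb
        (s.takeWhile pvNB) hp
      rw [← hcu] at hKp
      rw [hbody] at ha
      rcases hpop : pvSplit1 pvOPEN (s.takeWhile pvNB) with _ | ab
      · rw [hpop] at hKp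
        simp only [Option.elim_none] at hKp
        rw [hKgen pvOPEN pv_open_ne pv_open_nb] at hKp
        rw [hKp] at ha
        rcases htt : pvSplit1 pvOPEN t with _ | cd
        · rw [htt] at ha; cases ha
        · rw [htt] at ha
          simp only [Option.map_some] at ha
          injection ha with e
          have hcd2 : cd.2 = [] := congrArg Prod.snd e
          rw [hbody, hslgen (s.takeWhile pvNB) t hpB (List.prefix_refl t)]
          simp only [pvA1, hpop]
          exact ih t (by omega) (fun ch hc2 => hdom ch (hmem ch hc2)) ⟨cd.1, by rw [htt, ← hcd2]⟩
      · rw [hpop] at hKp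
        simp only [Option.elim_some] at hKp
        rw [hKp] at ha
        injection ha with e
        have h0 : ab.2 ++ (brk ++ t) = [] := congrArg Prod.snd e
        rw [hcu] at h0
        rcases List.append_eq_nil_iff.mp h0 with ⟨-, h2⟩
        cases h2


theorem pv_A_eq (s : String) :
    iter_candidate_lines s = (pvA1 (PySem.Chars.splitlines s.toList)).map String.ofList := by
  unfold iter_candidate_lines
  have hsp : PySem.Str.splitlines s = (PySem.Chars.splitlines s.toList).map String.ofList := rfl
  rw [hsp]
  exact pv_bridge_A _ (pv_lines_nb s.toList)

theorem pv_D_iff (s : String) :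
    D_iter_candidate_lines s ↔ ∃ a, pvSplit1 pvOPEN s.toList = some (a, []) := by
  unfold D_iter_candidate_lines
  have hfind : PySem.Str.find s "R\"PINYIN_DICT(" = PySem.Chars.find s.toList pvOPEN := by
    simp [PySem.Str.find, pvOPEN]
  rw [hfind]
  constructor
  · rintro ⟨h14, hf⟩
    rcases hop : pvSplit1 pvOPEN s.toList with _ | ⟨a, b⟩
    · rw [pv_find_none pv_open_ne hop] at hf
      omega
    · have hdec := pv_split1_decomp hop
      rw [pv_find_some pv_open_ne hop] at hf
      have hlen : s.toList.length = a.length + 14 + b.length := by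
        rw [hdec]; simp [pv_open_len]; omega
      simp only at hf
      have hb : b = [] := List.eq_nil_of_length_eq_zero (by omega)
      exact ⟨a, by subst hb; rfl⟩
  · rintro ⟨a, hop⟩
    have hdec := pv_split1_decomp hop
    rw [pv_find_some pv_open_ne hop]
    have hlen : s.toList.length = a.length + 14 := by
      rw [hdec]; simp [pv_open_len]; try omega
    constructor
    · omega
    · simp only; omega

theorem pv_dom_chars {s : String} (h : Dom_iter_candidate_lines s) :
    ∀ c ∈ s.toList, pvDomChar c = true := by
  unfold Dom_iter_candidate_lines pvDomStr at h
  exact fun c hc => List.all_eq_true.mp h c hc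

-- ===== VERDICT (by name: the statement is the Claim_ definition above) =====
theorem iter_candidate_lines_spec : Claim_unchanged_iter_candidate_lines := by
  unfold Claim_unchanged_iter_candidate_lines
  intro s hdom
  unfold Spec_iter_candidate_lines
  intro hnd
  rw [pv_D_iff] at hnd
  rw [pv_A_eq, pv_B_eq]
  congr 1
  exact pv_M1_aux s.toList.length s.toList (le_refl _) (pv_dom_chars hdom)
    (fun a h => hnd ⟨a, h⟩)

theorem iter_candidate_lines_changed : Claim_changed_iter_candidate_lines := by
  unfold Claim_changed_iter_candidate_lines; decide

theorem iter_candidate_lines_tight : Claim_exact_iter_candidate_lines := by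
  unfold Claim_exact_iter_candidate_lines
  intro s hdom hD
  obtain ⟨a, hop⟩ := (pv_D_iff s).mp hD
  rw [pv_A_eq, pv_B_eq]
  rw [pv_MD_aux s.toList.length s.toList (le_refl _) (pv_dom_chars hdom) ⟨a, hop⟩]
  have hB : pvBchars s.toList = [] := by
    simp only [pvBchars, hop]
    rfl
  rw [hB]
  simp
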